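-- pv_equiv track=rewrite | github.com/Feyerabend/bb | ch08/sec8.7/ml/mnist/cnn.py | max_pool
-- ===== SOURCE A (Python) =====
-- POOL_SIZE = 2
--
-- def max_pool(image):
--     img_size = len(image)
--     output_size = img_size // POOL_SIZE
--     output = [[0] * output_size for _ in range(output_size)]
--     for i in range(output_size):
--         for j in range(output_size):
--             output[i][j] = max(image[i * POOL_SIZE + x][j * POOL_SIZE + y] for x in range(POOL_SIZE) for y in range(POOL_SIZE))
--     return output
-- ===== SOURCE B (Python) =====
-- def max_pool(image):
--     # separable pooling: first max adjacent column pairs, then max adjacent row pairs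
--     output_size = len(image) // 2
--     hmax = [[max(row[2 * j], row[2 * j + 1]) for j in range(output_size)]
--             for row in image[:2 * output_size]]
--     return [[max(hmax[2 * i][j], hmax[2 * i + 1][j]) for j in range(output_size)]
--             for i in range(output_size)]
-- ===== Notes on version B (the rewrite author's own statement) =====
-- stated objective: alternative
-- what changed: Replaces the per-cell max over a 2x2 window with separable two-pass pooling: one pass maxes adjacent column pairs per row into an intermediate table, a second pass maxes adjacent row pairs of that table.
-- outside the precondition, e.g. on max_pool([[1], [2]]): A raises IndexError, B raises IndexError
import Mathlib
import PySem

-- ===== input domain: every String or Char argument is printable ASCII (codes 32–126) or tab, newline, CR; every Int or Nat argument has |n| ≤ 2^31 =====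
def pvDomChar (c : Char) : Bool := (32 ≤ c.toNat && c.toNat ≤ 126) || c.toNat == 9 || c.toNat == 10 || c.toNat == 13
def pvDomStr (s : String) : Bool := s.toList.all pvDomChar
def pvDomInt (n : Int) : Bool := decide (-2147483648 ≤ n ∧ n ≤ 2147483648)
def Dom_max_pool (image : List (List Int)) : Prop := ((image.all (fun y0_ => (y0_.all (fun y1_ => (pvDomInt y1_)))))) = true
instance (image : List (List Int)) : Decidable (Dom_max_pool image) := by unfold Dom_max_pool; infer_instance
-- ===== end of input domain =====

-- B re-implements 2x2 max pooling as separable two-pass pooling (column-pair maxes, then row-pair maxes); same cost, different decomposition.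
-- ===== PORT A =====
-- out-of-range column reads default to 0 in the port; Pre_max_pool excludes exactly those inputs (Python raises IndexError there)
def max_pool (image : List (List Int)) : List (List Int) :=
  let output_size := image.length / 2
  (List.range output_size).map (fun i =>
    (List.range output_size).map (fun j =>
      let g := fun (x y : Nat) => (image.getD (i * 2 + x) []).getD (j * 2 + y) 0
      max (max (max (g 0 0) (g 0 1)) (g 1 0)) (g 1 1)))

-- ===== PORT B =====
def max_pool_alt (image : List (List Int)) : List (List Int) :=
  let output_size := image.length / 2
  let hmax := (image.take (2 * output_size)).map (fun row =>
    (List.range output_size).map (fun j => max (row.getD (2 * j) 0) (row.getD (2 * j + 1) 0)))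
  (List.range output_size).map (fun i =>
    (List.range output_size).map (fun j =>
      max ((hmax.getD (2 * i) []).getD j 0) ((hmax.getD (2 * i + 1) []).getD j 0)))

-- ===== PRECONDITION & SPEC =====
-- Pre_ excludes exactly the inputs where Python A raises IndexError: some accessed row
-- (among the first 2*(n//2) rows) shorter than 2*(n//2). B raises there as well.
def Pre_max_pool (image : List (List Int)) : Prop :=
  ∀ row ∈ image.take (2 * (image.length / 2)), 2 * (image.length / 2) ≤ row.length
instance (image : List (List Int)) : Decidable (Pre_max_pool image) := by unfold Pre_max_pool; infer_instance
def pvWitness_max_pool : List (List Int) := [[1, 2], [3, 4]]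
def Spec_max_pool (image : List (List Int)) (out : List (List Int)) : Prop := out = max_pool_alt image
instance (image : List (List Int)) (out : List (List Int)) : Decidable (Spec_max_pool image out) := by unfold Spec_max_pool; infer_instance

-- ===== CLAIM (what is proved, stated in full; the proofs are below) =====
def Claim_equal_max_pool : Prop := ∀ (image : List (List Int)), Dom_max_pool image → Pre_max_pool image → Spec_max_pool image (max_pool image)

-- ===== LEMMAS AND PROOFS =====
theorem hmax_row (image : List (List Int)) (k : Nat) (hk : k < 2 * (image.length / 2)) :
    ((image.take (2 * (image.length / 2))).map (fun row =>
      (List.range (image.length / 2)).map (fun j => max (row.getD (2 * j) 0) (row.getD (2 * j + 1) 0)))).getD k []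
    = (List.range (image.length / 2)).map (fun j =>
        max ((image.getD k []).getD (2 * j) 0) ((image.getD k []).getD (2 * j + 1) 0)) := by
  have hlen : k < image.length := by omega
  have htk : k < (image.take (2 * (image.length / 2))).length := by
    simp [List.length_take]; omega
  rw [List.getD_eq_getElem _ _ (by simpa using htk)]
  simp [List.getElem_take, List.getElem?_eq_getElem hlen]

theorem getD_map_range (f : Nat → Int) (m j : Nat) (hj : j < m) :
    ((List.range m).map f).getD j 0 = f j := by
  rw [List.getD_eq_getElem _ _ (by simpa using hj)]; simp

-- ===== VERDICT (by name: the statement is the Claim_ definition above) =====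
theorem max_pool_spec : Claim_equal_max_pool := by
  intro image _ _
  unfold Spec_max_pool max_pool max_pool_alt
  simp only []
  apply List.map_congr_left
  intro i hi
  rw [List.mem_range] at hi
  apply List.map_congr_left
  intro j hj
  rw [List.mem_range] at hj
  rw [hmax_row image (2 * i) (by omega), hmax_row image (2 * i + 1) (by omega)]
  rw [getD_map_range _ _ _ hj, getD_map_range _ _ _ hj]
  simp [Nat.mul_comm, max_assoc]
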